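-- pv_equiv track=rewrite | github.com/DaNGoiz/silo_minimax | minimax_heuristic/minimax_john.py | is_great_victory
-- ===== SOURCE A (Python) =====
-- RED = "R"
--
-- BLUE = "B"
--
-- def is_great_victory(state):
--     for team_char in [RED, BLUE]:
--         silo_occupy_cnt = 0
--         for i in range(0, len(state), 3):
--             silo_state = state[i:i+3]
--             team_ball_cnt = silo_state.count(team_char)
--             top_silo_ball = silo_state[-1]
--             if (team_ball_cnt >= 2) and (top_silo_ball == team_char):
--                 silo_occupy_cnt += 1
--         if (silo_occupy_cnt >= 3):
--             return team_char
--     return ""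
-- ===== SOURCE B (Python) =====
-- def is_great_victory(state):
--     red = 0
--     blue = 0
--     for i in range(0, len(state), 3):
--         silo = state[i:i+3]
--         top = silo[-1]
--         if top == "R" and silo.count("R") >= 2:
--             red += 1
--         elif top == "B" and silo.count("B") >= 2:
--             blue += 1
--     if red >= 3:
--         return "R"
--     if blue >= 3:
--         return "B"
--     return ""
-- ===== Notes on version B (the rewrite author's own statement) =====
-- stated objective: simpler
-- what changed: One combined pass over the silos maintaining both teams' counters (keyed by the top ball) replaces A's two separate full scans, one per team, with early return.
import Mathlib
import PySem

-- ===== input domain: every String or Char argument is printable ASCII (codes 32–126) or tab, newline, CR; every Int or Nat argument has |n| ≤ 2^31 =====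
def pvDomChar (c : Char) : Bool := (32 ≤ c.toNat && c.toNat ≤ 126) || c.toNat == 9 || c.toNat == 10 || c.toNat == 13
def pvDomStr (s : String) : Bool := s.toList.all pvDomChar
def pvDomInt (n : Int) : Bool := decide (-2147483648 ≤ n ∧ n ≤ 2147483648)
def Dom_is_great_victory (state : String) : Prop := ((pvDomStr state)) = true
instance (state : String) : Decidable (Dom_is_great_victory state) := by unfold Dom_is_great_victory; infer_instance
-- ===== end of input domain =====

-- B: one combined pass over the silos maintaining both teams' counters replaces A's two per-team scans (objective: simpler).


-- ===== PORT A =====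
-- inner loop body of A for one team: silo_state = state[i:i+3]; count; top = silo_state[-1]
def pvStepA (s : List Char) (team : Char) (cnt : Int) (i : Int) : Int :=
  let silo := PySem.List.slice s (some i) (some (i + 3))
  let ballCnt : Int := silo.count team
  match PySem.List.pyGet? silo (-1) with
  | some top => if ballCnt ≥ 2 ∧ top = team then cnt + 1 else cnt
  | none => cnt  -- unreachable: the slice is nonempty for every i produced by the range

def pvSiloCnt (s : List Char) (team : Char) : Int :=
  (PySem.List.pyRange 0 (s.length : Int) 3).foldl (pvStepA s team) 0

-- outer 'for team_char in [RED, BLUE]' with early return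
def pvTeamsLoop (s : List Char) : List Char → String
  | [] => ""
  | t :: rest => if pvSiloCnt s t ≥ 3 then String.ofList [t] else pvTeamsLoop s rest

def is_great_victory (state : String) : String :=
  pvTeamsLoop state.toList ['R', 'B']

-- ===== PORT B =====
-- single pass: classify each silo by its top ball, maintaining both counters
def pvStepB (s : List Char) (acc : Int × Int) (i : Int) : Int × Int :=
  let silo := PySem.List.slice s (some i) (some (i + 3))
  match PySem.List.pyGet? silo (-1) with
  | some top =>
    if top = 'R' ∧ (silo.count 'R' : Int) ≥ 2 then (acc.1 + 1, acc.2)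
    else if top = 'B' ∧ (silo.count 'B' : Int) ≥ 2 then (acc.1, acc.2 + 1)
    else acc
  | none => acc  -- unreachable: the slice is nonempty for every i produced by the range

def is_great_victory_alt (state : String) : String :=
  let s := state.toList
  let rb := (PySem.List.pyRange 0 (s.length : Int) 3).foldl (pvStepB s) (0, 0)
  if rb.1 ≥ 3 then "R" else if rb.2 ≥ 3 then "B" else ""

-- ===== PRECONDITION & SPEC =====
def Spec_is_great_victory (state : String) (out : String) : Prop := out = is_great_victory_alt state
instance (state : String) (out : String) : Decidable (Spec_is_great_victory state out) := by unfold Spec_is_great_victory; infer_instance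

-- ===== CLAIM (what is proved, stated in full; the proofs are below) =====
def Claim_equal_is_great_victory : Prop := ∀ (state : String), Dom_is_great_victory state → Spec_is_great_victory state (is_great_victory state)

-- ===== LEMMAS AND PROOFS =====

-- one step of B's combined fold is the pair of A's two per-team steps
theorem pvStepB_eq_pair (s : List Char) (acc : Int × Int) (i : Int) :
    pvStepB s acc i = (pvStepA s 'R' acc.1 i, pvStepA s 'B' acc.2 i) := by
  unfold pvStepB pvStepA
  cases h : PySem.List.pyGet? (PySem.List.slice s (some i) (some (i + 3))) (-1) with
  | none => simp [h]
  | some top => simp only [h]; split_ifs <;> simp_all <;> omega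

-- B's combined fold computes both of A's per-team counts in one pass
theorem pvFold_pair (s : List Char) (l : List Int) (rc bc : Int) :
    l.foldl (pvStepB s) (rc, bc) =
      (l.foldl (pvStepA s 'R') rc, l.foldl (pvStepA s 'B') bc) := by
  induction l generalizing rc bc with
  | nil => rfl
  | cons i rest ih =>
    simp only [List.foldl_cons, pvStepB_eq_pair]
    exact ih _ _

-- ===== VERDICT (by name: the statement is the Claim_ definition above) =====
theorem is_great_victory_spec : Claim_equal_is_great_victory := by
  intro state _
  show is_great_victory state = is_great_victory_alt state
  unfold is_great_victory is_great_victory_alt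
  simp only [pvFold_pair, pvTeamsLoop, pvSiloCnt]
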